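-- pv_equiv track=rewrite | github.com/Shrish236/Mindgrove-Documentation | Employee Task Dashboard/app.py | calc_occupancy
-- ===== SOURCE A (Python) =====
-- def calc_occupancy(output_planned, name):
--   events = []
--   for person, tasks in output_planned.items():
--     if person == name:
--       for data in tasks:
--         events.append((data['Planned Start'], 'start'))
--         events.append((data['Planned End'], 'end'))
--
--   events.sort(key=lambda x: x[0])
--   task_count = {}
--   result_dates = []
--
--   current_tasks = 0
--
--   for event in events:
--       date, event_type = event
--       if event_type == 'start':
--           current_tasks += 1
--       else:
--           current_tasks -= 1
--
--       task_count[date] = current_tasks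
--
--       if date not in result_dates:
--           result_dates.append(date)
--
--   result_dates.sort()
--
--   return result_dates, [task_count[date] for date in result_dates]
-- ===== SOURCE B (Python) =====
-- def calc_occupancy(output_planned, name):
--     delta = {}
--     for person, tasks in output_planned.items():
--         if person == name:
--             for data in tasks:
--                 s = data['Planned Start']
--                 e = data['Planned End']
--                 delta[s] = delta.get(s, 0) + 1
--                 delta[e] = delta.get(e, 0) - 1
--     result_dates = sorted(delta)
--     counts = []
--     total = 0
--     for d in result_dates:
--         total += delta[d]
--         counts.append(total)
--     return result_dates, counts
-- ===== Notes on version B (the rewrite author's own statement) =====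
-- stated objective: alternative
-- what changed: Instead of materialising 2n (date,'start'/'end') event tuples, sorting them, sweeping with a running counter while deduplicating dates by a linear 'not in' list scan, B accumulates a net per-date delta in one dict pass, sorts the distinct dates once, and recovers the counts by a single prefix-sum pass over those dates.
import Mathlib
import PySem

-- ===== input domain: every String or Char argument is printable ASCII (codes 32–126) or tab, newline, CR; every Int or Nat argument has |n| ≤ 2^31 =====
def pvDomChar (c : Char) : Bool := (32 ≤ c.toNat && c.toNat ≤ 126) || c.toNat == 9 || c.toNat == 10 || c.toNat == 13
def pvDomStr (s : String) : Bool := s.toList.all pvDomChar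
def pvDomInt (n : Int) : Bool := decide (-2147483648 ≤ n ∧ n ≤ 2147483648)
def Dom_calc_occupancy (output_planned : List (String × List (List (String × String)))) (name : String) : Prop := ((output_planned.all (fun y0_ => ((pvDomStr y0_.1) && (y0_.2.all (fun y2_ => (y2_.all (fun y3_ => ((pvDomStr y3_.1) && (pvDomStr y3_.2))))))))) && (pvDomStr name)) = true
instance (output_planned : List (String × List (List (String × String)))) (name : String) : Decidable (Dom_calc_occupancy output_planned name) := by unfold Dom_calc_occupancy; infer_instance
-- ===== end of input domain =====

-- B replaces A's 2n-event sort-and-sweep (with a quadratic `not in` list dedup) by a per-date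
-- net-delta dict, one sort of the distinct dates, and a prefix-sum pass (objective: alternative).

-- ===== PORT A =====
-- data[k] for a task dict: first-match lookup; Pre_ guarantees the key is present (Python raises KeyError otherwise)
def pvDateD (data : List (String × String)) (k : String) : String :=
  (PySem.Dict.mk data).getD k ""

-- the `for event in events:` sweep of A, carrying (current_tasks, task_count, result_dates)
def sweepA : List (String × String) → Int × PySem.Dict String Int × List String → Int × PySem.Dict String Int × List String
  | [], st => st
  | ev :: rest, (cur, tc, rd) =>
      let cur' := if ev.2 == "start" then cur + 1 else cur - 1
      sweepA rest (cur', tc.insert ev.1 cur', if rd.contains ev.1 then rd else rd ++ [ev.1])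

def calc_occupancy (output_planned : List (String × List (List (String × String)))) (name : String) : List String × List Int :=
  let events : List (String × String) := output_planned.foldl (fun ev p =>
      if p.1 == name then
        p.2.foldl (fun ev data => ev ++ [(pvDateD data "Planned Start", "start"), (pvDateD data "Planned End", "end")]) ev
      else ev) []
  let events := PySem.List.sorted events (fun x => x.1) false
  let st := sweepA events (0, PySem.Dict.empty, [])
  let result_dates := PySem.List.sorted st.2.2 (fun x => x) false
  -- task_count[date]: every date in result_dates was written by the sweep, so the default is never read
  (result_dates, result_dates.map (fun d => st.2.1.getD d 0))

-- ===== PORT B =====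
-- delta[date] = delta.get(date, 0) + v
def pvAddDelta (d : PySem.Dict String Int) (date : String) (v : Int) : PySem.Dict String Int :=
  d.insert date (d.getD date 0 + v)

-- the prefix-sum loop of B: running total, append the total per date
def pvPrefix : List String → PySem.Dict String Int → Int → List Int
  | [], _, _ => []
  | d :: rest, delta, total =>
      let total' := total + delta.getD d 0
      total' :: pvPrefix rest delta total'

def calc_occupancy_alt (output_planned : List (String × List (List (String × String)))) (name : String) : List String × List Int :=
  let delta : PySem.Dict String Int := output_planned.foldl (fun d p =>
      if p.1 == name then
        p.2.foldl (fun d data => pvAddDelta (pvAddDelta d (pvDateD data "Planned Start") 1) (pvDateD data "Planned End") (-1)) d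
      else d) PySem.Dict.empty
  let result_dates := PySem.List.sorted delta.keys (fun x => x) false
  (result_dates, pvPrefix result_dates delta 0)

-- ===== PRECONDITION & SPEC =====
-- Pre_ excludes exactly the inputs where Python A raises KeyError: a task of the selected person
-- missing the 'Planned Start' or 'Planned End' key (B raises KeyError there too).
def Pre_calc_occupancy (output_planned : List (String × List (List (String × String)))) (name : String) : Prop :=
  (output_planned.all (fun p => p.1 != name ||
    p.2.all (fun t => (PySem.Dict.mk t).contains "Planned Start" && (PySem.Dict.mk t).contains "Planned End"))) = true
instance (output_planned : List (String × List (List (String × String)))) (name : String) : Decidable (Pre_calc_occupancy output_planned name) := by unfold Pre_calc_occupancy; infer_instance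

def pvWitness_calc_occupancy : (List (String × List (List (String × String)))) × String :=
  ([("x", [[("Planned Start", "2024-01-01"), ("Planned End", "2024-01-03")]])], "x")

def Spec_calc_occupancy (output_planned : List (String × List (List (String × String)))) (name : String) (out : List String × List Int) : Prop := out = calc_occupancy_alt output_planned name
instance (output_planned : List (String × List (List (String × String)))) (name : String) (out : List String × List Int) : Decidable (Spec_calc_occupancy output_planned name out) := by unfold Spec_calc_occupancy; infer_instance

-- ===== CLAIM (what is proved, stated in full; the proofs are below) =====
def Claim_equal_calc_occupancy : Prop := ∀ (output_planned : List (String × List (List (String × String)))) (name : String), Dom_calc_occupancy output_planned name → Pre_calc_occupancy output_planned name → Spec_calc_occupancy output_planned name (calc_occupancy output_planned name)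

-- ===== LEMMAS AND PROOFS =====

-- the flat event list both programs traverse
def pvEvents (output_planned : List (String × List (List (String × String)))) (name : String) : List (String × String) :=
  (output_planned.filter (fun p => p.1 == name)).flatMap (fun p =>
    p.2.flatMap (fun data => [(pvDateD data "Planned Start", "start"), (pvDateD data "Planned End", "end")]))

def pvDelta (ev : String × String) : Int := if ev.2 == "start" then 1 else -1

def pvF (E : List (String × String)) (d : String) : Int :=
  ((E.filter (fun ev => decide (ev.1 ≤ d))).map pvDelta).sum

lemma pvF_cons_pos (ev : String × String) (rest : List (String × String)) (d : String) (h : ev.1 ≤ d) :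
    pvF (ev :: rest) d = pvDelta ev + pvF rest d := by
  unfold pvF
  rw [List.filter_cons, if_pos (decide_eq_true h)]
  simp

lemma pvF_cons_nil (ev : String × String) (rest : List (String × String)) (d : String)
    (hfilter : rest.filter (fun e => decide (e.1 ≤ d)) = []) (h : ev.1 ≤ d) :
    pvF (ev :: rest) d = pvDelta ev := by
  unfold pvF
  rw [List.filter_cons, if_pos (decide_eq_true h), hfilter]
  simp

lemma eventsA_eq (output_planned : List (String × List (List (String × String)))) (name : String) :
    (output_planned.foldl (fun ev p =>
      if p.1 == name then
        p.2.foldl (fun ev data => ev ++ [(pvDateD data "Planned Start", "start"), (pvDateD data "Planned End", "end")]) ev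
      else ev) []) = pvEvents output_planned name := by
  rw [PySem.List.foldl_if_eq_foldl_filter]
  simp only [PySem.List.foldl_append_eq_flatMap]
  simp [pvEvents]

lemma deltaB_eq (output_planned : List (String × List (List (String × String)))) (name : String) :
    (output_planned.foldl (fun d p =>
      if p.1 == name then
        p.2.foldl (fun d data => pvAddDelta (pvAddDelta d (pvDateD data "Planned Start") 1) (pvDateD data "Planned End") (-1)) d
      else d) PySem.Dict.empty) =
    (pvEvents output_planned name).foldl (fun d ev => pvAddDelta d ev.1 (pvDelta ev)) PySem.Dict.empty := by
  rw [PySem.List.foldl_if_eq_foldl_filter]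
  unfold pvEvents
  rw [List.foldl_flatMap]
  apply PySem.List.foldl_congr_mem
  intro acc p _
  rw [List.foldl_flatMap]
  apply PySem.List.foldl_congr_mem
  intro acc2 data _
  show _ = pvAddDelta (pvAddDelta acc2 _ (pvDelta (_, "start"))) _ (pvDelta (_, "end"))
  rfl

lemma getD_addDelta_foldl (l : List (String × String)) (d0 : PySem.Dict String Int) (v : String) :
    (l.foldl (fun d ev => pvAddDelta d ev.1 (pvDelta ev)) d0).getD v 0
      = d0.getD v 0 + ((l.filter (fun ev => ev.1 == v)).map pvDelta).sum := by
  induction l generalizing d0 with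
  | nil => simp
  | cons ev rest ih =>
    simp only [List.foldl_cons, ih, List.filter_cons]
    by_cases h : ev.1 = v
    · simp [pvAddDelta, h]; ring
    · simp [pvAddDelta, PySem.Dict.getD_insert, h]
      exact fun h' => absurd h'.symm h

lemma sweepA_rd (es : List (String × String)) (c : Int) (tc : PySem.Dict String Int) (rd : List String) :
    (sweepA es (c, tc, rd)).2.2 = PySem.Set.update rd (es.map (·.1)) := by
  induction es generalizing c tc rd with
  | nil => simp [sweepA, PySem.Set.update_nil]
  | cons ev rest ih =>
    simp only [sweepA, List.map_cons, PySem.Set.update_cons, ih]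
    congr 1

lemma sweepA_tc_not_mem (es : List (String × String)) (c : Int) (tc : PySem.Dict String Int) (rd : List String)
    (d : String) (hd : d ∉ es.map (·.1)) :
    (sweepA es (c, tc, rd)).2.1.getD d 0 = tc.getD d 0 := by
  induction es generalizing c tc rd with
  | nil => simp [sweepA]
  | cons ev rest ih =>
    simp only [List.map_cons, List.mem_cons, not_or] at hd
    simp only [sweepA, ih _ _ _ hd.2]
    simp [PySem.Dict.getD_insert, hd.1]

lemma sweepA_tc (es : List (String × String)) (c : Int) (tc : PySem.Dict String Int) (rd : List String)
    (hsort : es.Pairwise (fun a b => a.1 ≤ b.1)) (d : String) (hd : d ∈ es.map (·.1)) :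
    (sweepA es (c, tc, rd)).2.1.getD d 0 = c + pvF es d := by
  induction es generalizing c tc rd with
  | nil => simp at hd
  | cons ev rest ih =>
    have hpw := List.pairwise_cons.mp hsort
    by_cases hmem : d ∈ rest.map (·.1)
    · have hle : ev.1 ≤ d := by
        obtain ⟨e', he', rfl⟩ := List.mem_map.mp hmem
        exact hpw.1 e' he'
      simp only [sweepA]
      rw [ih _ _ _ hpw.2 hmem, pvF_cons_pos _ _ _ hle]
      simp only [pvDelta]
      split_ifs <;> ring
    · have hdev : d = ev.1 := by
        simp only [List.map_cons, List.mem_cons] at hd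
        tauto
      subst hdev
      simp only [sweepA]
      rw [sweepA_tc_not_mem _ _ _ _ _ hmem, PySem.Dict.getD_insert_self]
      have hfilter : rest.filter (fun e => decide (e.1 ≤ ev.1)) = [] := by
        rw [List.filter_eq_nil_iff]
        intro e he
        simp only [decide_eq_true_eq]
        intro hle
        exact hmem (List.mem_map.mpr ⟨e, he, le_antisymm hle (hpw.1 e he)⟩)
      rw [pvF_cons_nil _ _ _ hfilter le_rfl]
      simp only [pvDelta]
      split_ifs <;> ring

lemma sum_map_filter_partition (l : List (String × String)) (p q : (String × String) → Bool) :
    ((l.filter p).map pvDelta).sum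
      = ((l.filter (fun x => p x && q x)).map pvDelta).sum + ((l.filter (fun x => p x && !q x)).map pvDelta).sum := by
  induction l with
  | nil => simp
  | cons x xs ih =>
    by_cases hp : p x = true <;> by_cases hq : q x = true <;>
      simp [hp, hq, ih] <;> ring

lemma pvPrefix_eq (S : List String) (E' : List (String × String)) (delta : PySem.Dict String Int) (t : Int)
    (hS : S.Pairwise (· < ·))
    (hcomp : ∀ ev ∈ E', ev.1 ∈ S)
    (hg : ∀ dd ∈ S, delta.getD dd 0 = ((E'.filter (fun ev => ev.1 == dd)).map pvDelta).sum) :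
    pvPrefix S delta t = S.map (fun dd => t + ((E'.filter (fun ev => decide (ev.1 ≤ dd))).map pvDelta).sum) := by
  induction S generalizing E' t with
  | nil => simp [pvPrefix]
  | cons d rest ih =>
    have hpw := List.pairwise_cons.mp hS
    have hfe : E'.filter (fun ev => decide (ev.1 ≤ d)) = E'.filter (fun ev => ev.1 == d) := by
      apply List.filter_congr
      intro ev hev
      by_cases he : ev.1 = d
      · simp [he]
      · have hin : ev.1 ∈ rest := by
          rcases List.mem_cons.mp (hcomp ev hev) with h | h
          · exact absurd h he
          · exact h
        simp [he, not_le.mpr (hpw.1 _ hin)]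
    simp only [pvPrefix, List.map_cons]
    have hhead : delta.getD d 0 = ((E'.filter (fun ev => decide (ev.1 ≤ d))).map pvDelta).sum := by
      rw [hfe]; exact hg d List.mem_cons_self
    refine congrArg₂ _ (by rw [hhead]) ?_
    rw [ih (E'.filter (fun ev => !(ev.1 == d))) (t + delta.getD d 0) hpw.2 ?hc ?hgg]
    case hc =>
      intro ev hev
      rw [List.mem_filter] at hev
      rcases List.mem_cons.mp (hcomp ev hev.1) with h | h
      · simp [h] at hev
      · exact h
    case hgg =>
      intro dd hdd
      have hne : dd ≠ d := ne_of_gt (hpw.1 _ hdd)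
      have heq : E'.filter (fun a => a.1 == dd && !(a.1 == d)) = E'.filter (fun ev => ev.1 == dd) := by
        apply List.filter_congr
        intro ev _
        by_cases he : ev.1 = dd <;> simp [he, hne]
      rw [hg dd (List.mem_cons_of_mem _ hdd), List.filter_filter, heq]
    apply List.map_congr_left
    intro dd hdd
    have hlt : d < dd := hpw.1 _ hdd
    rw [List.filter_filter]
    have hsplit := sum_map_filter_partition E' (fun ev => decide (ev.1 ≤ dd)) (fun ev => ev.1 == d)
    have h1 : E'.filter (fun x => decide (x.1 ≤ dd) && (x.1 == d)) = E'.filter (fun ev => ev.1 == d) := by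
      apply List.filter_congr
      intro ev _
      by_cases he : ev.1 = d <;> simp [he, le_of_lt hlt]
    rw [hg d List.mem_cons_self, hsplit, h1]
    ring

-- ===== VERDICT (by name: the statement is the Claim_ definition above) =====
theorem calc_occupancy_spec : Claim_equal_calc_occupancy := by
  intro op name _ _
  unfold Spec_calc_occupancy
  simp only [calc_occupancy, calc_occupancy_alt]
  rw [eventsA_eq, deltaB_eq]
  set E := pvEvents op name with hE
  set Es := PySem.List.sorted E (fun x => x.1) false with hEs
  set delta := E.foldl (fun d ev => pvAddDelta d ev.1 (pvDelta ev)) PySem.Dict.empty with hdelta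
  have hEperm : Es.Perm E := PySem.List.sorted_perm E (fun x => x.1) false
  have hkeys : delta.keys = PySem.Set.ofList (E.map (fun ev => ev.1)) := by
    rw [hdelta]
    simp only [pvAddDelta]
    rw [PySem.Dict.keys_foldl_insert_key (key := fun ev : String × String => ev.1)]
    simp [PySem.Set.update_nil_left]
  have hRA : (sweepA Es (0, PySem.Dict.empty, [])).2.2 = PySem.Set.ofList (Es.map (fun ev => ev.1)) := by
    rw [sweepA_rd]
    simp [PySem.Set.update_nil_left]
  have hperm : (PySem.Set.ofList (Es.map (fun ev => ev.1))).Perm (PySem.Set.ofList (E.map (fun ev => ev.1))) := by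
    refine (List.perm_ext_iff_of_nodup (PySem.Set.nodup_ofList _) (PySem.Set.nodup_ofList _)).mpr ?_
    intro x
    simp only [PySem.Set.mem_ofList]
    exact (hEperm.map (fun ev => ev.1)).mem_iff
  have hR : PySem.List.sorted ((sweepA Es (0, PySem.Dict.empty, [])).2.2) (fun x => x) false
      = PySem.List.sorted delta.keys (fun x => x) false := by
    rw [hRA, hkeys]
    exact PySem.List.sorted_eq_sorted_of_perm _ _ _ (fun a b h => h) hperm
  rw [hR]
  refine congrArg (Prod.mk _) ?_
  rw [pvPrefix_eq (PySem.List.sorted delta.keys (fun x => x) false) E delta 0 ?hS ?hcomp ?hg]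
  case hS =>
    rw [hkeys]
    exact PySem.List.sorted_ofList_pairwise_lt (List.map (fun ev => ev.1) E)
  case hcomp =>
    intro ev hev
    rw [hkeys, PySem.List.mem_sorted, PySem.Set.mem_ofList]
    exact List.mem_map.mpr ⟨ev, hev, rfl⟩
  case hg =>
    intro dd _
    rw [hdelta, getD_addDelta_foldl]
    simp
  apply List.map_congr_left
  intro d hd
  have hdmem : d ∈ Es.map (fun ev => ev.1) := by
    rw [hkeys, PySem.List.mem_sorted, PySem.Set.mem_ofList] at hd
    exact (hEperm.map (fun ev => ev.1)).mem_iff.mpr hd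
  rw [sweepA_tc Es 0 PySem.Dict.empty [] (PySem.List.sorted_pairwise E (fun x => x.1) : _) d hdmem]
  have hfperm : (Es.filter (fun ev => decide (ev.1 ≤ d))).Perm (E.filter (fun ev => decide (ev.1 ≤ d))) :=
    hEperm.filter _
  unfold pvF
  rw [(hfperm.map pvDelta).sum_eq]
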